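-- pv_equiv track=rewrite | github.com/akx/aoc2018 | d4p1.py | get_sleep_spans
-- ===== SOURCE A (Python) =====
-- import collections
--
-- def get_sleep_spans(events):
--     events_by_gid = collections.defaultdict(list)
--     for event in events:
--         events_by_gid[event[1]].append(event)
--
--     spans_asleep = collections.defaultdict(list)
--     for gid, events in events_by_gid.items():
--         last_sleep_time = None
--         for time, gid, event in events:
--             if event in ('start', 'awake'):
--                 if last_sleep_time:
--                     spans_asleep[gid].append((last_sleep_time, time))
--                 last_sleep_time = None
--             else:
--                 last_sleep_time = time
--     return spans_asleep
-- ===== SOURCE B (Python) =====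
-- def get_sleep_spans(events):
--     def spans(evts, last=None):
--         if not evts:
--             return []
--         time, _gid, ev = evts[0]
--         rest = evts[1:]
--         if ev in ('start', 'awake'):
--             return ([(last, time)] if last else []) + spans(rest)
--         return spans(rest, time)
--
--     gids = dict.fromkeys(e[1] for e in events)
--     result = {}
--     for g in gids:
--         s = spans([e for e in events if e[1] == g])
--         if s:
--             result[g] = s
--     return result
-- ===== Notes on version B (the rewrite author's own statement) =====
-- stated objective: alternative
-- what changed: B replaces A's mutable defaultdict grouping and stateful per-guard scan with a purely functional scheme: first-seen guard ids via dict.fromkeys, a per-guard list comprehension filter, and a recursive span-pairing function instead of a loop with a last_sleep_time accumulator.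
import Mathlib
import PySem

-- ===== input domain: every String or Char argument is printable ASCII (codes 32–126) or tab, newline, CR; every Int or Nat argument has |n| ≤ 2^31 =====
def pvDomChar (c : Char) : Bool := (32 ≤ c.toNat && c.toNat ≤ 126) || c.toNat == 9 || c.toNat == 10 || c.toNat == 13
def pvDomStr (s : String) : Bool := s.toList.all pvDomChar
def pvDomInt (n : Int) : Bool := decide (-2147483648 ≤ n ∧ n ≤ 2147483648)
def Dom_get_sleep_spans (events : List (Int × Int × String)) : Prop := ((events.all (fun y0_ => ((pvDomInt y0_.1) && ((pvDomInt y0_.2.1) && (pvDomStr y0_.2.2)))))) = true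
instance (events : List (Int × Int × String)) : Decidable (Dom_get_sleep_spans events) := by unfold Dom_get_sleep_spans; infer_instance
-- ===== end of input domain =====

-- B replaces A's mutable defaultdict grouping + stateful per-guard loop by a purely
-- functional scheme: first-seen guard ids, a per-guard filter, and a recursive
-- span-pairing function (objective: alternative decomposition, same result).

-- ===== PORT A =====
-- body of A's inner loop: state = (spans_asleep, last_sleep_time)
def pvInnerA (st : PySem.Dict Int (List (Int × Int)) × Option Int) (e : Int × Int × String) :
    PySem.Dict Int (List (Int × Int)) × Option Int :=
  let spans := st.1
  let last := st.2
  let time := e.1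
  let gid := e.2.1
  let ev := e.2.2
  if ev = "start" ∨ ev = "awake" then
    (match last with
      | some t => if t ≠ 0 then spans.modify gid [] (fun l => l ++ [(t, time)]) else spans
      | none => spans,
     none)
  else (spans, some time)

def get_sleep_spans (events : List (Int × Int × String)) : List (Int × List (Int × Int)) :=
  -- events_by_gid = defaultdict(list); for event in events: events_by_gid[event[1]].append(event)
  let events_by_gid := events.foldl (fun d e => d.modify e.2.1 [] (fun l => l ++ [e])) PySem.Dict.empty
  -- for gid, evs in events_by_gid.items(): last = None; for time, gid, event in evs: …
  let spans_asleep := events_by_gid.items.foldl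
      (fun sp p => (p.2.foldl pvInnerA (sp, none)).1) PySem.Dict.empty
  spans_asleep.items

-- ===== PORT B =====
-- Source B's recursive helper 'spans(evts, last)': pairs each pending sleep start with
-- the time of the next 'start'/'awake' event ('if last' drops a falsy, i.e. 0, start)
def pvSpansB (last : Option Int) (evts : List (Int × Int × String)) : List (Int × Int) :=
  match evts with
  | [] => []
  | e :: rest =>
    if e.2.2 = "start" ∨ e.2.2 = "awake" then
      (match last with
        | some l => if l ≠ 0 then [(l, e.1)] else []
        | none => []) ++ pvSpansB none rest
    else pvSpansB (some e.1) rest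

def get_sleep_spans_alt (events : List (Int × Int × String)) : List (Int × List (Int × Int)) :=
  -- gids = dict.fromkeys(e[1] for e in events)
  let gids := PySem.Set.ofList (events.map (fun e => e.2.1))
  -- for g in gids: s = spans([e for e in events if e[1] == g]); if s: result[g] = s
  gids.foldl (fun result g =>
    let s := pvSpansB none (events.filter (fun e => e.2.1 == g))
    if s = [] then result else result ++ [(g, s)]) []

-- ===== PRECONDITION & SPEC =====
def Spec_get_sleep_spans (events : List (Int × Int × String)) (out : List (Int × List (Int × Int))) : Prop := out = get_sleep_spans_alt events
instance (events : List (Int × Int × String)) (out : List (Int × List (Int × Int))) : Decidable (Spec_get_sleep_spans events out) := by unfold Spec_get_sleep_spans; infer_instance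

-- ===== CLAIM (what is proved, stated in full; the proofs are below) =====
def Claim_equal_get_sleep_spans : Prop := ∀ (events : List (Int × Int × String)), Dom_get_sleep_spans events → Spec_get_sleep_spans events (get_sleep_spans events)

-- ===== LEMMAS AND PROOFS =====

-- abstract per-guard scan (the semantics of A's inner loop restricted to one guard)
def pvStepG (st : List (Int × Int) × Option Int) (e : Int × Int × String) : List (Int × Int) × Option Int :=
  if e.2.2 = "start" ∨ e.2.2 = "awake" then
    (match st.2 with
      | some t => if t ≠ 0 then st.1 ++ [(t, e.1)] else st.1
      | none => st.1,
     none)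
  else (st.1, some e.1)

def pvGrp (g : Int) (events : List (Int × Int × String)) : List (Int × Int × String) :=
  events.filter (fun e => e.2.1 == g)

def pvAcc (g : Int) (events : List (Int × Int × String)) : List (Int × Int) :=
  ((pvGrp g events).foldl pvStepG ([], none)).1

def pvLast (g : Int) (events : List (Int × Int × String)) : Option Int :=
  ((pvGrp g events).foldl pvStepG ([], none)).2

def pvGids (events : List (Int × Int × String)) : List Int :=
  PySem.Set.ofList (events.map (fun e => e.2.1))

def pvMrg (sp : PySem.Dict Int (List (Int × Int))) (g : Int) (acc : List (Int × Int)) :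
    PySem.Dict Int (List (Int × Int)) :=
  acc.foldl (fun sp x => sp.modify g [] (fun l => l ++ [x])) sp

theorem pv_stepG_pre (evs : List (Int × Int × String)) (acc : List (Int × Int)) (last : Option Int) :
    evs.foldl pvStepG (acc, last)
      = (acc ++ (evs.foldl pvStepG ([], last)).1, (evs.foldl pvStepG ([], last)).2) := by
  induction evs generalizing acc last with
  | nil => simp
  | cons e evs ih =>
    have hstep : pvStepG (acc, last) e = (acc ++ (pvStepG ([], last) e).1, (pvStepG ([], last) e).2) := by
      simp only [pvStepG]
      split_ifs with h
      · cases last with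
        | none => simp
        | some t => by_cases ht : t = 0 <;> simp [ht]
      · simp
    simp only [List.foldl_cons, hstep]
    rw [ih, ih (pvStepG ([], last) e).1 (pvStepG ([], last) e).2]
    simp

theorem pv_innerA (g : Int) (evs : List (Int × Int × String)) (hg : ∀ e ∈ evs, e.2.1 = g)
    (sp : PySem.Dict Int (List (Int × Int))) (last : Option Int) :
    evs.foldl pvInnerA (sp, last)
      = (pvMrg sp g (evs.foldl pvStepG ([], last)).1, (evs.foldl pvStepG ([], last)).2) := by
  induction evs generalizing sp last with
  | nil => simp [pvMrg]
  | cons e evs ih =>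
    have he : e.2.1 = g := hg e (by simp)
    have hg' : ∀ x ∈ evs, x.2.1 = g := fun x hx => hg x (by simp [hx])
    have hstep : pvInnerA (sp, last) e = (pvMrg sp g (pvStepG ([], last) e).1, (pvStepG ([], last) e).2) := by
      simp only [pvInnerA, pvStepG, he]
      split_ifs with h
      · cases last with
        | none => simp [pvMrg]
        | some t => by_cases ht : t = 0 <;> simp [ht, pvMrg]
      · simp [pvMrg]
    simp only [List.foldl_cons, hstep, ih hg']
    rcases hE : pvStepG ([], last) e with ⟨a1, l1⟩
    rw [pv_stepG_pre evs a1 l1]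
    simp [pvMrg, List.foldl_append]

theorem pv_keys_of_items_map {ν : Type} (d : PySem.Dict Int ν) (gs : List Int) (F : Int → ν)
    (h : d.items = gs.map (fun g => (g, F g))) : d.keys = gs := by
  have hcomp : ((fun x : Int × ν => x.1) ∘ fun g : Int => (g, F g)) = id := rfl
  simp [PySem.Dict.keys, h, List.map_map, hcomp]

theorem pv_contains_of_items_map {ν : Type} (d : PySem.Dict Int ν) (gs : List Int) (F : Int → ν)
    (h : d.items = gs.map (fun g => (g, F g))) (g0 : Int) :
    d.contains g0 = decide (g0 ∈ gs) := by
  rw [PySem.Dict.contains_eq_decide_mem_keys, pv_keys_of_items_map d gs F h]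

theorem pv_getD_of_items_map {ν : Type} (d : PySem.Dict Int ν) (gs : List Int) (F : Int → ν)
    (h : d.items = gs.map (fun g => (g, F g))) (hnd : gs.Nodup) {g : Int} (hm : g ∈ gs) (d0 : ν) :
    d.getD g d0 = F g := by
  apply PySem.Dict.getD_of_mem_items
  · rw [h]; exact List.mem_map_of_mem hm
  · rw [pv_keys_of_items_map d gs F h]; exact hnd

theorem pv_updMap {ν : Type} (gs : List Int) (F : Int → ν) (g0 : Int) (v : ν) :
    (gs.map (fun g => (g, F g))).map (fun p => if p.1 == g0 then (g0, v) else p)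
      = gs.map (fun g => (g, if g = g0 then v else F g)) := by
  simp only [List.map_map]
  apply List.map_congr_left
  intro g _
  by_cases h : g = g0 <;> simp [h]

theorem pv_map_if {ν : Type} (gs : List Int) (F G : Int → ν) (g0 : Int) (X : ν)
    (h1 : G g0 = X) (h2 : ∀ g, g ≠ g0 → G g = F g) :
    gs.map (fun g => (g, if g = g0 then X else F g)) = gs.map (fun g => (g, G g)) := by
  apply List.map_congr_left
  intro g _
  by_cases h : g = g0
  · subst h; simp [h1]
  · simp [h, h2 g h]

theorem pv_mrg_items_aux (g : Int) (its : List (Int × List (Int × Int)))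
    (hne : ∀ p ∈ its, p.1 ≠ g) (hnd : (its.map Prod.fst).Nodup) :
    ∀ (acc v : List (Int × Int)),
    (pvMrg (PySem.Dict.mk (its ++ [(g, v)])) g acc).items = its ++ [(g, v ++ acc)] := by
  intro acc
  induction acc with
  | nil => intro v; simp [pvMrg]
  | cons x acc ih =>
    intro v
    have hc : (PySem.Dict.mk (its ++ [(g, v)])).contains g = true := by
      rw [PySem.Dict.contains_eq_decide_mem_keys]
      simp [PySem.Dict.keys]
    have hk : (PySem.Dict.mk (its ++ [(g, v)])).keys.Nodup := by
      simp only [PySem.Dict.keys, List.map_append, List.map_cons, List.map_nil]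
      refine List.Nodup.append hnd (by simp) ?_
      intro a ha hb
      simp at hb
      subst hb
      rcases List.mem_map.mp ha with ⟨p, hp, hpe⟩
      exact hne p hp hpe
    have hgd : (PySem.Dict.mk (its ++ [(g, v)])).getD g [] = v :=
      PySem.Dict.getD_of_mem_items _ (by simp) hk []
    have hmod : (PySem.Dict.mk (its ++ [(g, v)])).modify g [] (fun l => l ++ [x])
        = PySem.Dict.mk (its ++ [(g, v ++ [x])]) := by
      apply PySem.Dict.ext
      simp only [PySem.Dict.modify]
      rw [hgd, PySem.Dict.items_insert_of_contains _ _ hc]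
      simp only [List.map_append]
      congr 1
      · have hid : ∀ p ∈ its, (fun p : Int × List (Int × Int) => if (p.1 == g) = true then (g, v ++ [x]) else p) p = id p := by
          intro p hp
          simp [hne p hp]
        rw [List.map_congr_left hid, List.map_id]
      · simp
    have hone : pvMrg (PySem.Dict.mk (its ++ [(g, v)])) g (x :: acc)
        = pvMrg (PySem.Dict.mk (its ++ [(g, v ++ [x])])) g acc := by
      simp [pvMrg, hmod]
    rw [hone, ih (v ++ [x])]
    simp

theorem pv_mrg_items (sp : PySem.Dict Int (List (Int × Int))) (g : Int) (acc : List (Int × Int))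
    (hnd : (sp.items.map Prod.fst).Nodup) (hfresh : sp.contains g = false) :
    (pvMrg sp g acc).items = if acc = [] then sp.items else sp.items ++ [(g, acc)] := by
  cases acc with
  | nil => simp [pvMrg]
  | cons x acc =>
    have hne : ∀ p ∈ sp.items, p.1 ≠ g := by
      intro p hp hpe
      have hmem : g ∈ sp.keys := by
        simp only [PySem.Dict.keys]
        exact hpe ▸ List.mem_map_of_mem hp
      have := (PySem.Dict.contains_iff_mem_keys sp g).mpr hmem
      rw [hfresh] at this
      exact Bool.false_ne_true this
    have hgd : sp.getD g [] = [] := PySem.Dict.getD_of_not_contains sp [] hfresh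
    have hmod : sp.modify g [] (fun l => l ++ [x]) = PySem.Dict.mk (sp.items ++ [(g, [x])]) := by
      apply PySem.Dict.ext
      simp only [PySem.Dict.modify]
      rw [hgd, PySem.Dict.items_insert_of_not_contains _ _ hfresh]
      simp
    have hone : pvMrg sp g (x :: acc) = pvMrg (PySem.Dict.mk (sp.items ++ [(g, [x])])) g acc := by
      simp [pvMrg, hmod]
    rw [hone, pv_mrg_items_aux g sp.items hne hnd acc [x]]
    simp

theorem pv_grp_append (g : Int) (es : List (Int × Int × String)) (e : Int × Int × String) :
    pvGrp g (es ++ [e]) = pvGrp g es ++ (if e.2.1 = g then [e] else []) := by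
  by_cases h : e.2.1 = g <;> simp [pvGrp, List.filter_append, h]

theorem pv_gids_append (es : List (Int × Int × String)) (e : Int × Int × String) :
    pvGids (es ++ [e])
      = if e.2.1 ∈ pvGids es then pvGids es else pvGids es ++ [e.2.1] := by
  have h1 : pvGids (es ++ [e]) = PySem.Set.add (pvGids es) e.2.1 := by
    simp [pvGids, PySem.Set.ofList, List.foldl_append]
  rw [h1]
  simp only [PySem.Set.add]
  by_cases hm : e.2.1 ∈ pvGids es
  · simp [hm]
  · simp [hm]

theorem pv_nodup_gids (es : List (Int × Int × String)) : (pvGids es).Nodup :=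
  PySem.Set.nodup_ofList _

theorem pv_mem_gids (es : List (Int × Int × String)) (g : Int) :
    g ∈ pvGids es ↔ g ∈ es.map (fun e => e.2.1) :=
  PySem.Set.mem_ofList _ _

theorem pv_grp_of_not_mem (g : Int) (es : List (Int × Int × String)) (h : g ∉ pvGids es) :
    pvGrp g es = [] := by
  rw [pvGrp, List.filter_eq_nil_iff]
  intro e he hbe
  exact h ((pv_mem_gids es g).mpr (by
    have : e.2.1 = g := by simpa using hbe
    exact this ▸ List.mem_map_of_mem he))

theorem pv_outerA (gl : List (Int × List (Int × Int × String))) :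
    ∀ (sp : PySem.Dict Int (List (Int × Int))),
    (sp.items.map Prod.fst).Nodup → (∀ p ∈ gl, sp.contains p.1 = false) →
    (gl.map Prod.fst).Nodup → (∀ p ∈ gl, ∀ e ∈ p.2, e.2.1 = p.1) →
    (gl.foldl (fun sp p => (p.2.foldl pvInnerA (sp, none)).1) sp).items
      = sp.items ++ gl.filterMap (fun p =>
          if (p.2.foldl pvStepG ([], none)).1 = [] then none
          else some (p.1, (p.2.foldl pvStepG ([], none)).1)) := by
  induction gl with
  | nil => intro sp _ _ _ _; simp
  | cons p gl ih =>
    intro sp hnd hfresh hkeys hgrp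
    simp only [List.foldl_cons, List.filterMap_cons]
    have hg : ∀ e ∈ p.2, e.2.1 = p.1 := hgrp p (by simp)
    have h1 : (p.2.foldl pvInnerA (sp, none)).1 = pvMrg sp p.1 (p.2.foldl pvStepG ([], none)).1 := by
      rw [pv_innerA p.1 p.2 hg sp none]
    have hfp : sp.contains p.1 = false := hfresh p (by simp)
    have hitems := pv_mrg_items sp p.1 (p.2.foldl pvStepG ([], none)).1 hnd hfp
    have hkeys_tail : (gl.map Prod.fst).Nodup := by
      simp only [List.map_cons, List.nodup_cons] at hkeys
      exact hkeys.2
    have hp_not : p.1 ∉ gl.map Prod.fst := by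
      simp only [List.map_cons, List.nodup_cons] at hkeys
      exact hkeys.1
    have hgrp_tail : ∀ q ∈ gl, ∀ e ∈ q.2, e.2.1 = q.1 := fun q hq => hgrp q (by simp [hq])
    by_cases hA : (p.2.foldl pvStepG ([], none)).1 = []
    · have hsp' : (pvMrg sp p.1 (p.2.foldl pvStepG ([], none)).1).items = sp.items := by
        rw [hitems, if_pos hA]
      have hkk : (pvMrg sp p.1 (p.2.foldl pvStepG ([], none)).1).keys = sp.keys := by
        unfold PySem.Dict.keys
        rw [hsp']
      have hfresh' : ∀ q ∈ gl, (pvMrg sp p.1 (p.2.foldl pvStepG ([], none)).1).contains q.1 = false := by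
        intro q hq
        rw [PySem.Dict.contains_eq_decide_mem_keys, hkk, ← PySem.Dict.contains_eq_decide_mem_keys]
        exact hfresh q (by simp [hq])
      rw [h1, ih _ (by rw [hsp']; exact hnd) hfresh' hkeys_tail hgrp_tail, hsp', if_pos hA]
    · have hsp' : (pvMrg sp p.1 (p.2.foldl pvStepG ([], none)).1).items
          = sp.items ++ [(p.1, (p.2.foldl pvStepG ([], none)).1)] := by
        rw [hitems, if_neg hA]
      have hnmem : p.1 ∉ sp.items.map Prod.fst := by
        intro hmem
        have : sp.contains p.1 = true := by
          rw [PySem.Dict.contains_eq_decide_mem_keys]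
          simp only [PySem.Dict.keys]
          simpa using hmem
        rw [hfp] at this
        exact Bool.false_ne_true this
      have hnd' : ((pvMrg sp p.1 (p.2.foldl pvStepG ([], none)).1).items.map Prod.fst).Nodup := by
        rw [hsp']
        simp only [List.map_append, List.map_cons, List.map_nil]
        refine List.Nodup.append hnd (by simp) ?_
        intro a ha hb
        simp at hb
        subst hb
        exact hnmem ha
      have hfresh' : ∀ q ∈ gl, (pvMrg sp p.1 (p.2.foldl pvStepG ([], none)).1).contains q.1 = false := by
        intro q hq
        rw [PySem.Dict.contains_eq_decide_mem_keys]
        simp only [PySem.Dict.keys, hsp']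
        have hq1 : q.1 ∉ sp.keys := by
          have := hfresh q (by simp [hq])
          rw [PySem.Dict.contains_eq_decide_mem_keys] at this
          simpa using this
        have hq2 : q.1 ≠ p.1 := by
          intro hqp
          exact hp_not (hqp ▸ List.mem_map_of_mem hq)
        simp only [PySem.Dict.keys] at hq1
        simp [hq1, hq2]
      rw [h1, ih _ hnd' hfresh' hkeys_tail hgrp_tail, hsp', if_neg hA]
      simp

theorem pv_ebg_items (events : List (Int × Int × String)) :
    (events.foldl (fun d e => d.modify e.2.1 [] (fun l => l ++ [e])) PySem.Dict.empty).items
      = (pvGids events).map (fun g => (g, pvGrp g events)) := by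
  induction events using List.reverseRecOn with
  | nil => rfl
  | append_singleton es e ih =>
    rw [List.foldl_append, List.foldl_cons, List.foldl_nil]
    set d := es.foldl (fun d e => d.modify e.2.1 [] (fun l => l ++ [e])) PySem.Dict.empty with hd
    have hnd : (pvGids es).Nodup := pv_nodup_gids es
    have hcont := pv_contains_of_items_map _ _ _ ih e.2.1
    by_cases hm : e.2.1 ∈ pvGids es
    · have hgd : d.getD e.2.1 [] = pvGrp e.2.1 es := pv_getD_of_items_map _ _ _ ih hnd hm []
      simp only [PySem.Dict.modify, hgd]
      rw [PySem.Dict.items_insert_of_contains _ _ (by rw [hcont]; simpa using hm), ih, pv_updMap,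
        pv_gids_append, if_pos hm]
      refine pv_map_if _ _ _ _ _ ?_ ?_
      · rw [pv_grp_append, if_pos rfl]
      · intro g hg
        rw [pv_grp_append, if_neg (fun h => hg h.symm)]
        simp
    · have hgd : d.getD e.2.1 [] = [] := PySem.Dict.getD_of_not_contains _ [] (by rw [hcont]; simpa using hm)
      simp only [PySem.Dict.modify, hgd]
      rw [PySem.Dict.items_insert_of_not_contains _ _ (by rw [hcont]; simpa using hm), ih,
        pv_gids_append, if_neg hm, List.map_append]
      congr 1
      · apply List.map_congr_left
        intro g hg
        have hne : e.2.1 ≠ g := fun h => hm (h ▸ hg)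
        rw [pv_grp_append, if_neg hne]
        simp
      · rw [List.map_cons, List.map_nil]
        have : pvGrp e.2.1 (es ++ [e]) = [e] := by
          rw [pv_grp_append, if_pos rfl, pv_grp_of_not_mem e.2.1 es hm]
          rfl
        simp [this]

-- B's recursive pairing computes exactly the accumulator of the abstract per-guard scan
theorem pv_spansB_eq_stepG (evs : List (Int × Int × String)) :
    ∀ last : Option Int, pvSpansB last evs = (evs.foldl pvStepG ([], last)).1 := by
  induction evs with
  | nil => intro last; rfl
  | cons e rest ih =>
    intro last
    by_cases hev : e.2.2 = "start" ∨ e.2.2 = "awake"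
    · have hstep : pvStepG ([], last) e
          = ((match last with
              | some l => if l ≠ 0 then [(l, e.1)] else []
              | none => []), none) := by
        simp only [pvStepG, hev, if_true]
        cases last with
        | none => rfl
        | some t => by_cases ht : t = 0 <;> simp [ht]
      simp only [pvSpansB]
      rw [if_pos hev, List.foldl_cons, hstep,
        pv_stepG_pre rest _ none, ih none]
    · simp only [pvSpansB]
      rw [if_neg hev, List.foldl_cons]
      have hstep : pvStepG ([], last) e = ([], some e.1) := by
        simp [pvStepG, hev]
      rw [hstep, ih (some e.1)]

-- B's result-building loop is the filterMap over guard ids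
theorem pv_foldB_filterMap (gs : List Int) (F : Int → List (Int × Int)) :
    ∀ acc : List (Int × List (Int × Int)),
    gs.foldl (fun result g => if F g = [] then result else result ++ [(g, F g)]) acc
      = acc ++ gs.filterMap (fun g => if F g = [] then none else some (g, F g)) := by
  induction gs with
  | nil => intro acc; simp
  | cons g gs ih =>
    intro acc
    by_cases h : F g = [] <;> simp [h, ih]

-- ===== VERDICT (by name: the statement is the Claim_ definition above) =====
theorem get_sleep_spans_spec : Claim_equal_get_sleep_spans := by
  intro events _
  unfold Spec_get_sleep_spans get_sleep_spans get_sleep_spans_alt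
  simp only []
  have hkeys : (((pvGids events).map (fun g => (g, pvGrp g events))).map Prod.fst).Nodup := by
    have hcomp : ((Prod.fst : Int × List (Int × Int × String) → Int) ∘ fun g => (g, pvGrp g events)) = id := rfl
    rw [List.map_map, hcomp, List.map_id]
    exact pv_nodup_gids events
  have hgrp : ∀ p ∈ (pvGids events).map (fun g => (g, pvGrp g events)), ∀ e ∈ p.2, e.2.1 = p.1 := by
    intro p hp e he
    rcases List.mem_map.mp hp with ⟨g, _, rfl⟩
    have := List.of_mem_filter he
    simpa using this
  have hB : PySem.Set.ofList (events.map (fun e => e.2.1)) = pvGids events := rfl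
  rw [hB, pv_ebg_items events,
    pv_outerA _ PySem.Dict.empty List.nodup_nil (by intro p _; rfl) hkeys hgrp,
    List.filterMap_map,
    pv_foldB_filterMap (pvGids events)
      (fun g => pvSpansB none (events.filter (fun e => e.2.1 == g))) []]
  simp only [List.nil_append]
  apply List.filterMap_congr
  intro g _
  rw [pv_spansB_eq_stepG]
  rfl
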